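-- pv_equiv track=rewrite | github.com/kma7574/Algorithm | Baekjoon/22351_수학은 체육과목 입니다3.py | solution
-- ===== SOURCE A (Python) =====
-- def solution(data):
--     length = len(data)
--
--     start_list = [data[0], data[:2], data[:3]]  # 첫번째숫자가 한자리,두자리,세자리인경우
--     for i in start_list:
--         number = ''
--         tmp = i
--
--         while len(number) < length:
--             number += tmp
--
--             if number == data:
--                 return i, tmp
--             tmp = str(int(tmp) + 1)
--
--     return data, data
-- ===== SOURCE B (Python) =====
-- def solution(data):
--     length = len(data)
--     for k in (1, 2, 3):
--         expected = data[:k]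
--         pos = 0
--         while data[pos:pos + len(expected)] == expected:
--             pos += len(expected)
--             if pos == length:
--                 return data[:k], expected
--             expected = str(int(expected) + 1)
--     return data, data
-- ===== Notes on version B (the rewrite author's own statement) =====
-- stated objective: alternative
-- what changed: B replaces A's accumulate-and-compare search (rebuilding the whole concatenation string and comparing it to data each step) with a pointer-based parser that keeps an index and the current expected token, matches it against the slice data[pos:pos+len(expected)], and breaks on the first mismatch.
import Mathlib
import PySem

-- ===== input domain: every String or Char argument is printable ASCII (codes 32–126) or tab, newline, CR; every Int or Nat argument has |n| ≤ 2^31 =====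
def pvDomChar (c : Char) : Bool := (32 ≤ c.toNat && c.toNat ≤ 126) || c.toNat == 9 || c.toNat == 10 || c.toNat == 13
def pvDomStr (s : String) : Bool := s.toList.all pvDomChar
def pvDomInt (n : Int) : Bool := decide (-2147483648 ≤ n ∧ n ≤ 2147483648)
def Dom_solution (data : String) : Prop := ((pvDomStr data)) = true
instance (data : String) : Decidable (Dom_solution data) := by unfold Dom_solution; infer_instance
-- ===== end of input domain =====

-- B rewrites the build-and-compare search as a pointer-based parser (index + current
-- token matched against a slice, breaking on first mismatch) instead of accumulating a
-- concatenation string; objective: alternative decomposition (same asymptotic cost).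

-- shared helper: tmp = str(int(tmp) + 1).  Python's int() raises ValueError where
-- PySem.Int.ofChars? is none; Pre_solution keeps such tokens out, so `.getD 0` is
-- never the value actually used on admitted inputs.
def pvInc (t : List Char) : List Char := PySem.Int.toChars ((PySem.Int.ofChars? t).getD 0 + 1)

-- ===== PORT A =====
-- the while-loop: number accumulates; fuel (length+1) dominates the iteration count
-- because number grows by at least one character per step on admitted inputs.
def loopA (L i tmp number : List Char) (fuel : Nat) : Option (List Char × List Char) :=
  match fuel with
  | 0 => none
  | fuel + 1 =>
    if number.length < L.length then
      let number' := number ++ tmp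
      if number' = L then some (i, tmp)
      else loopA L i (pvInc tmp) number' fuel
    else none

-- the `for i in start_list` loop with early return
def loopStartsA (L : List Char) : List (List Char) → Option (List Char × List Char)
  | [] => none
  | i :: rest =>
    match loopA L i i [] (L.length + 1) with
    | some r => some r
    | none => loopStartsA L rest

def solution (data : String) : String × String :=
  -- start_list = [data[0], data[:2], data[:3]] (data[0]: IndexError on "" → outside Pre_)
  match loopStartsA data.toList
      [((PySem.List.pyGet? data.toList 0).map (fun c => [c])).getD [],
       PySem.List.slice data.toList none (some 2), PySem.List.slice data.toList none (some 3)] with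
  | some (i, t) => (String.ofList i, String.ofList t)
  | none => (data, data)

-- ===== PORT B =====
-- the while-loop of Source B: pos + expected, match data[pos:pos+len(expected)], break on
-- mismatch; same fuel bound (pos advances by at least one per step on admitted inputs).
def loopB (L expected : List Char) (pos : Nat) (fuel : Nat) : Option (List Char) :=
  match fuel with
  | 0 => none
  | fuel + 1 =>
    if PySem.List.slice L (some (pos : Int)) (some ((pos + expected.length : Nat) : Int)) = expected then
      let pos' := pos + expected.length
      if pos' = L.length then some expected
      else loopB L (pvInc expected) pos' fuel
    else none

-- the `for k in (1, 2, 3)` loop with early return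
def loopKsB (L : List Char) : List Int → Option (List Char × List Char)
  | [] => none
  | k :: rest =>
    match loopB L (PySem.List.slice L none (some k)) 0 (L.length + 1) with
    | some t => some (PySem.List.slice L none (some k), t)
    | none => loopKsB L rest

def solution_alt (data : String) : String × String :=
  match loopKsB data.toList [1, 2, 3] with
  | some (i, t) => (String.ofList i, String.ofList t)
  | none => (data, data)

-- ===== PRECONDITION & SPEC =====
-- the concatenation str(a) + str(a+1) + … + str(a+m-1): used only to STATE, declaratively,
-- that an input is a consecutive-integer concatenation starting from a given token.
def concatFrom (a : Int) : Nat → List Char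
  | 0 => []
  | m + 1 => PySem.Int.toChars a ++ concatFrom (a + 1) (m + 1 - 1)

-- Pre_ is exactly the set of inputs on which A RETURNS: A raises IndexError on "" and,
-- for longer inputs, ValueError at int(prefix) whenever a prefix it actually reaches is
-- not int()-parsable — prefixes of length 1 and 2 are always reached (when shorter than
-- data), while int(data[:3]) is skipped when the two-char-token consecutive decomposition
-- of data succeeds first (a digit, a whitespace char, then the following integers).
def Pre_solution (data : String) : Prop :=
  data.toList ≠ [] ∧
  (2 ≤ data.toList.length → (PySem.Int.ofChars? (data.toList.take 1)).isSome = true) ∧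
  (3 ≤ data.toList.length → (PySem.Int.ofChars? (data.toList.take 2)).isSome = true) ∧
  (4 ≤ data.toList.length →
    (PySem.Int.ofChars? (data.toList.take 3)).isSome = true ∨
    (List.range data.toList.length).any (fun m =>
      data.toList.drop 2 = concatFrom ((PySem.Int.ofChars? (data.toList.take 2)).getD 0 + 1) (m + 1)) = true)
instance (data : String) : Decidable (Pre_solution data) := by unfold Pre_solution; infer_instance

def pvWitness_solution : String := "910"

def Spec_solution (data : String) (out : String × String) : Prop := out = solution_alt data
instance (data : String) (out : String × String) : Decidable (Spec_solution data out) := by unfold Spec_solution; infer_instance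

-- ===== CLAIM (what is proved, stated in full; the proofs are below) =====
def Claim_equal_solution : Prop := ∀ (data : String), Dom_solution data → Pre_solution data → Spec_solution data (solution data)

-- ===== LEMMAS AND PROOFS =====

-- str(n) is never empty: Nat.toDigitsCore with positive fuel emits at least one digit
lemma toDigitsCore_ne_nil (b : Nat) : ∀ (f n : Nat) (lst : List Char),
    (lst ≠ [] ∨ 0 < f) → Nat.toDigitsCore b f n lst ≠ [] := by
  intro f
  induction f with
  | zero =>
    intro n lst h
    rcases h with h | h
    · simpa [Nat.toDigitsCore] using h
    · omega
  | succ f ih =>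
    intro n lst _
    simp only [Nat.toDigitsCore]
    split
    · simp
    · exact ih _ _ (Or.inl (by simp))

-- pvInc always produces a nonempty token (str(n) is never empty)
lemma pvInc_ne_nil (t : List Char) : pvInc t ≠ [] := by
  unfold pvInc PySem.Int.toChars
  split
  · simp
  · exact toDigitsCore_ne_nil 10 _ _ _ (Or.inr (by omega))

-- A's loop can never succeed once the accumulated string stops being a prefix of data
lemma loopA_not_prefix (L i : List Char) :
    ∀ (fuel : Nat) (tmp number : List Char), ¬ number <+: L →
      loopA L i tmp number fuel = none := by
  intro fuel
  induction fuel with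
  | zero => intro tmp number _; rfl
  | succ fuel ih =>
    intro tmp number h
    simp only [loopA]
    split
    · rw [if_neg, ih]
      · intro hp
        rcases hp with ⟨s, hs⟩
        exact h ⟨tmp ++ s, by rw [← List.append_assoc]; exact hs⟩
      · intro he
        exact h ⟨tmp, he⟩
    · rfl

-- prefix test through the split at pos
lemma drop_take_len (L : List Char) (pos : Nat) :
    L.drop (L.take pos).length = L.drop pos := by
  rcases le_total pos L.length with h | h
  · simp [List.length_take, Nat.min_eq_left h]
  · simp [List.length_take, Nat.min_eq_right h, List.drop_eq_nil_of_le h]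

lemma prefix_split (L t : List Char) (pos : Nat) :
    (L.take pos ++ t <+: L) ↔ t <+: L.drop pos := by
  constructor
  · rintro ⟨s, hs⟩
    refine ⟨s, ?_⟩
    have h := congrArg (List.drop (L.take pos).length) hs
    rw [List.append_assoc, List.drop_left, drop_take_len] at h
    exact h
  · rintro ⟨s, hs⟩
    exact ⟨s, by rw [List.append_assoc, hs, List.take_append_drop]⟩

-- core correspondence: A's loop on number = data[:pos] is B's loop at index pos
lemma loop_eq (L i : List Char) :
    ∀ (fuel : Nat) (tmp : List Char) (pos : Nat), pos ≤ L.length → tmp ≠ [] →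
      loopA L i tmp (L.take pos) fuel = (loopB L tmp pos fuel).map (fun t => (i, t)) := by
  intro fuel
  induction fuel with
  | zero => intro tmp pos _ _; rfl
  | succ fuel ih =>
    intro tmp pos hpos htmp
    simp only [loopA, loopB]
    have hslice : PySem.List.slice L (some (pos : Int)) (some ((pos + tmp.length : Nat) : Int))
        = (L.drop pos).take tmp.length := by simp [pysem]
    rcases lt_or_eq_of_le hpos with hlt | heq
    · rw [if_pos (by simpa [List.length_take, Nat.min_eq_left hpos] using hlt)]
      by_cases hm : (L.drop pos).take tmp.length = tmp
      · -- the token matches data[pos:pos+len]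
        have hmle : tmp.length ≤ (L.drop pos).length := by
          have h := congrArg List.length hm
          rw [List.length_take] at h
          omega
        have hple : pos + tmp.length ≤ L.length := by
          rw [List.length_drop] at hmle
          omega
        have happ : L.take pos ++ tmp = L.take (pos + tmp.length) := by
          rw [List.take_add, hm]
        rw [hslice, if_pos hm, happ]
        by_cases hend : pos + tmp.length = L.length
        · rw [if_pos (by rw [hend, List.take_length]), if_pos hend]
          rfl
        · rw [if_neg, if_neg hend]
          · exact ih (pvInc tmp) (pos + tmp.length) hple (pvInc_ne_nil tmp)
          · intro he
            have := congrArg List.length he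
            rw [List.length_take, Nat.min_eq_left hple] at this
            exact hend this
      · -- mismatch: B breaks; A can never recover
        have hnp : ¬ L.take pos ++ tmp <+: L := by
          rw [prefix_split]
          intro hp
          exact hm ((List.prefix_iff_eq_take.mp hp).symm)
        rw [hslice, if_neg hm, if_neg (fun he => hnp ⟨[], by simp [he]⟩),
          loopA_not_prefix L i fuel (pvInc tmp) _ hnp]
        rfl
    · -- pos = length: A's while-condition and B's slice match both fail
      rw [if_neg (by simp [heq]), hslice, if_neg]
      · rfl
      · rw [heq, List.drop_length]
        intro hx
        exact htmp (by simpa using hx.symm)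

-- the three starts coincide
lemma starts_eq (L : List Char) (h : L ≠ []) :
    loopStartsA L [((PySem.List.pyGet? L 0).map (fun c => [c])).getD [],
      PySem.List.slice L none (some 2), PySem.List.slice L none (some 3)]
      = loopKsB L [1, 2, 3] := by
  obtain ⟨c, rest, rfl⟩ : ∃ c rest, L = c :: rest := by
    cases L with
    | nil => exact absurd rfl h
    | cons c rest => exact ⟨c, rest, rfl⟩
  have t1 : PySem.List.slice (c :: rest) none (some (1 : Int)) = (c :: rest).take 1 := by
    simpa using PySem.List.slice_to (xs := c :: rest) (b := 1) (by omega)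
  have t2 : PySem.List.slice (c :: rest) none (some (2 : Int)) = (c :: rest).take 2 := by
    simpa using PySem.List.slice_to (xs := c :: rest) (b := 2) (by omega)
  have t3 : PySem.List.slice (c :: rest) none (some (3 : Int)) = (c :: rest).take 3 := by
    simpa using PySem.List.slice_to (xs := c :: rest) (b := 3) (by omega)
  have e1 : ((PySem.List.pyGet? (c :: rest) 0).map (fun c => [c])).getD [] = (c :: rest).take 1 := by
    simp [PySem.List.pyGet?, PySem.List.pyIdx?]
  have lk : ∀ s : List Char, s ≠ [] →
      loopA (c :: rest) s s [] ((c :: rest).length + 1)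
        = (loopB (c :: rest) s 0 ((c :: rest).length + 1)).map (fun t => (s, t)) := by
    intro s hs
    simpa using loop_eq (c :: rest) s ((c :: rest).length + 1) s 0 (by omega) hs
  have h1 : (c :: rest).take 1 ≠ [] := by simp
  have h2 : (c :: rest).take 2 ≠ [] := by simp
  have h3 : (c :: rest).take 3 ≠ [] := by simp
  simp only [loopStartsA, loopKsB, e1, t1, t2, t3, lk _ h1, lk _ h2, lk _ h3]
  cases loopB (c :: rest) ((c :: rest).take 1) 0 ((c :: rest).length + 1) <;>
    cases loopB (c :: rest) ((c :: rest).take 2) 0 ((c :: rest).length + 1) <;>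
      cases loopB (c :: rest) ((c :: rest).take 3) 0 ((c :: rest).length + 1) <;> rfl

-- ===== VERDICT (by name: the statement is the Claim_ definition above) =====
theorem solution_spec : Claim_equal_solution := by
  intro data _ hpre
  unfold Spec_solution solution solution_alt
  rw [starts_eq data.toList hpre.1]
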